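-- pv_equiv track=rewrite | github.com/Gendo90/HackerRank | Graphs/dijkstraShortestReach.py | bfsConnectivityCheck
-- ===== SOURCE A (Python) =====
-- import collections
--
-- def bfsConnectivityCheck(s, graph):
--     seen = set()
--     start = graph[s]
--     queue = collections.deque([a[0] for a in start])
--     while(queue):
--         curr = queue.popleft()
--         if(curr not in seen):
--             seen.add(curr)
--             more_vals = [a[0] for a in graph[curr] if a[0] not in seen]
--             queue.extend(more_vals)
--
--     connected_graph = {}
--     for node in seen:
--         connected_graph[node] = graph[node]
--
--     return connected_graph
-- ===== SOURCE B (Python) =====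
-- def bfsConnectivityCheck(s, graph):
--     # Level-synchronous BFS that builds the result dict directly while it
--     # discovers nodes: no deque, no separate 'seen' set, no second pass.
--     connected_graph = {}
--     frontier = [a[0] for a in graph[s]]
--     while frontier:
--         nxt = []
--         for node in frontier:
--             if node not in connected_graph:
--                 connected_graph[node] = graph[node]
--                 nxt += [a[0] for a in graph[node]]
--         frontier = nxt
--     return connected_graph
-- ===== Notes on version B (the rewrite author's own statement) =====
-- stated objective: simpler
-- what changed: Replaces the deque-plus-visited-set BFS with a final dict-rebuilding pass by a level-synchronous frontier BFS that builds the result dict directly while discovering nodes (no deque, no separate seen set, no second pass, no per-enqueue filtering).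
import Mathlib
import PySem

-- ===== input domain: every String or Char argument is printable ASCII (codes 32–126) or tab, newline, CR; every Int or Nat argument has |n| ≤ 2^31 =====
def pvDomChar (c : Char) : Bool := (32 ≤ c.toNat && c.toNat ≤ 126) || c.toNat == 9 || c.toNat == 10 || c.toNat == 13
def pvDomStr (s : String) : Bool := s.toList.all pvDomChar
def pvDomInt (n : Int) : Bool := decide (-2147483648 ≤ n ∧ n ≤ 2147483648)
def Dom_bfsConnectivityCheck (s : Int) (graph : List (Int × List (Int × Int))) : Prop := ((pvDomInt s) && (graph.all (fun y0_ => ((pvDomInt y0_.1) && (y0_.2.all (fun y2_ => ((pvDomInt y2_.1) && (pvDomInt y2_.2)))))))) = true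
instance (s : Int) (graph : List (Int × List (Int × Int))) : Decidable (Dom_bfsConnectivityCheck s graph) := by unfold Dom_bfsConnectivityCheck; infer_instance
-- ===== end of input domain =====

-- B replaces A's deque BFS + visited set + final dict-rebuilding pass by a level-synchronous
-- frontier BFS that builds the result dict directly while discovering nodes (objective: simpler).

-- ===== PORT A =====
-- Shared helper: the comprehension [a[0] for a in graph[n]]; graph[n] is read with default []
-- (Python raises KeyError on a missing key — those inputs are excluded by Pre_).
def pvTargets (graph : List (Int × List (Int × Int))) (n : Int) : List Int :=
  ((PySem.Dict.mk graph).getD n []).map (fun a => a.1)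

-- Termination-measure machinery for the two loops (cited by name in decreasing_by).
def pvUniv (graph : List (Int × List (Int × Int))) : List Int :=
  PySem.List.dedup (graph.map (fun p => p.1) ++ graph.flatMap (fun p => p.2.map (fun a => a.1)))

def pvT (graph : List (Int × List (Int × Int))) : Nat :=
  (graph.flatMap (fun p => p.2.map (fun a => a.1))).length

def pvMu (graph : List (Int × List (Int × Int))) (seen : List Int) (q : List Int) : Nat :=
  ((pvUniv graph).filter (fun u => !(PySem.Set.contains seen u))).length * (pvT graph + 1) + q.length

theorem pv_filter_lt {U : List Int} {p p' : Int → Bool} (hmono : ∀ u, p' u = true → p u = true)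
    {x : Int} (hx : x ∈ U) (hp : p x = true) (hp' : p' x = false) :
    (U.filter p').length < (U.filter p).length := by
  induction U with
  | nil => cases hx
  | cons h t ih =>
    by_cases hhx : h = x
    · subst hhx
      simp only [List.filter_cons, hp, hp', if_true]
      simp only [Bool.false_eq_true, if_false, List.length_cons]
      exact Nat.lt_succ_of_le (List.Sublist.length_le (List.monotone_filter_right t hmono))
    · have hxt : x ∈ t := by cases hx with | head => exact absurd rfl hhx | tail _ h2 => exact h2
      simp only [List.filter_cons]
      cases hph : p h with
      | true =>
        cases hph' : p' h with
        | true => simpa using Nat.succ_lt_succ (ih hxt)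
        | false =>
          simp only [Bool.false_eq_true, if_false, if_true, List.length_cons]
          exact Nat.lt_succ_of_le (Nat.le_of_lt (ih hxt))
      | false =>
        have h2 : p' h = false := by
          cases hq : p' h with
          | true => exact absurd (hmono h hq) (by simp [hph])
          | false => rfl
        simp only [h2, Bool.false_eq_true, if_false]
        exact ih hxt

theorem pv_scontains_iff (s : PySem.Set Int) (x : Int) :
    PySem.Set.contains s x = true ↔ x ∈ s := by
  simp [PySem.Set.contains]

theorem pv_scontains_add_mono {seen : PySem.Set Int} {y : Int} (x : Int)
    (h : PySem.Set.contains seen y = true) :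
    PySem.Set.contains (PySem.Set.add seen x) y = true := by
  rw [pv_scontains_iff] at h ⊢
  exact (PySem.Set.mem_add seen x y).mpr (Or.inl h)

theorem pv_scontains_add_self (seen : PySem.Set Int) (x : Int) :
    PySem.Set.contains (PySem.Set.add seen x) x = true := by
  rw [pv_scontains_iff]
  exact (PySem.Set.mem_add seen x x).mpr (Or.inr rfl)

theorem pv_scontains_add_ne {y x : Int} (seen : PySem.Set Int) (h : y ≠ x) :
    PySem.Set.contains (PySem.Set.add seen x) y = PySem.Set.contains seen y := by
  cases hc : PySem.Set.contains seen y with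
  | true =>
    simp [PySem.Set.contains] at hc ⊢
    exact Or.inl hc
  | false =>
    cases hc2 : PySem.Set.contains (PySem.Set.add seen x) y with
    | false => rfl
    | true =>
      simp [PySem.Set.contains] at hc hc2
      rcases hc2 with h1 | h1
      · exact absurd h1 hc
      · exact absurd h1 h

theorem pv_targets_len_le (graph : List (Int × List (Int × Int))) (n : Int) :
    (pvTargets graph n).length ≤ pvT graph := by
  simp only [pvTargets, pvT, List.length_map]
  induction graph with
  | nil => simp [PySem.Dict.getD, PySem.Dict.get?]
  | cons hd t ih =>
    rw [show PySem.Dict.mk (hd :: t) = PySem.Dict.mk ((hd.1, hd.2) :: t) by rfl]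
    simp only [PySem.Dict.getD, PySem.Dict.get?_mk_cons]
    by_cases h : (hd.1 == n) = true
    · simp [h]
    · simp only [Bool.not_eq_true] at h
      simp only [h, Bool.false_eq_true, if_false, List.flatMap_cons, List.length_append]
      simp only [PySem.Dict.getD] at ih
      omega

theorem pv_targets_nil {graph : List (Int × List (Int × Int))} {n : Int}
    (h : n ∉ pvUniv graph) : pvTargets graph n = [] := by
  rw [pvUniv] at h
  rw [PySem.List.mem_dedup] at h
  simp only [List.mem_append, not_or] at h
  have hk : n ∉ (PySem.Dict.mk graph).keys := by
    rw [PySem.Dict.keys_mk]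
    exact h.1
  have hnone := (PySem.Dict.get?_eq_none_iff_not_mem_keys (PySem.Dict.mk graph) n).mpr hk
  simp [pvTargets, PySem.Dict.getD, hnone]

theorem pv_mu_step (graph : List (Int × List (Int × Int))) (seen : PySem.Set Int) (x : Int)
    (q ext : List Int) (hx : PySem.Set.contains seen x = false)
    (hext : ext.length ≤ (pvTargets graph x).length) :
    pvMu graph (PySem.Set.add seen x) (q ++ ext) < pvMu graph seen (x :: q) := by
  by_cases hx2 : x ∈ pvUniv graph
  · have hmono : ∀ u, (!(PySem.Set.contains (PySem.Set.add seen x) u)) = true →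
        (!(PySem.Set.contains seen u)) = true := by
      intro u hu
      cases hc : PySem.Set.contains seen u with
      | false => rfl
      | true => rw [pv_scontains_add_mono x hc] at hu; simp at hu
    have hlt := pv_filter_lt (U := pvUniv graph) hmono hx2 (by rw [hx]; rfl)
      (by rw [pv_scontains_add_self]; rfl)
    have hT : ext.length ≤ pvT graph := le_trans hext (pv_targets_len_le graph x)
    have hm := Nat.mul_le_mul_right (pvT graph + 1) (Nat.succ_le_of_lt hlt)
    rw [Nat.succ_mul] at hm
    unfold pvMu
    simp only [List.length_append, List.length_cons]
    omega
  · have hext0 : ext = [] := by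
      rw [pv_targets_nil hx2] at hext
      exact List.eq_nil_of_length_eq_zero (Nat.le_zero.mp hext)
    have hcong : (pvUniv graph).filter (fun u => !(PySem.Set.contains (PySem.Set.add seen x) u))
        = (pvUniv graph).filter (fun u => !(PySem.Set.contains seen u)) := by
      apply List.filter_congr
      intro u hu
      have hne : u ≠ x := fun hh => hx2 (hh ▸ hu)
      rw [pv_scontains_add_ne seen hne]
    unfold pvMu
    rw [hcong, hext0]
    simp

-- A's while-loop over the deque (queue.extend of the seen-filtered neighbour list).
def bfsLoopA (graph : List (Int × List (Int × Int))) (seen : PySem.Set Int)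
    (queue : List Int) : PySem.Set Int :=
  match queue with
  | [] => seen
  | curr :: rest =>
    if h : PySem.Set.contains seen curr then bfsLoopA graph seen rest
    else
      bfsLoopA graph (PySem.Set.add seen curr)
        (rest ++ (pvTargets graph curr).filter
          (fun v => !(PySem.Set.contains (PySem.Set.add seen curr) v)))
  termination_by pvMu graph seen queue
  decreasing_by
  · simp [pvMu]
  · exact pv_mu_step graph seen curr rest _ (by simp_all) (List.length_filter_le _ _)

-- A's final loop: for node in seen: connected_graph[node] = graph[node]
def pvDictOf (graph : List (Int × List (Int × Int))) (seen : List Int) :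
    PySem.Dict Int (List (Int × Int)) :=
  seen.foldl (fun d node => d.insert node ((PySem.Dict.mk graph).getD node [])) PySem.Dict.empty

def bfsConnectivityCheck (s : Int) (graph : List (Int × List (Int × Int))) :
    List (Int × List (Int × Int)) :=
  let queue := pvTargets graph s
  let seen := bfsLoopA graph [] queue
  (pvDictOf graph seen).items

-- ===== PORT B =====
def pvNu (graph : List (Int × List (Int × Int))) (c : PySem.Dict Int (List (Int × Int))) : Nat :=
  ((pvUniv graph).filter (fun u => !(PySem.Dict.contains c u))).length

-- body of B's inner 'for node in frontier' loop, state = (connected_graph, nxt)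
def bfsStepB (graph : List (Int × List (Int × Int)))
    (st : PySem.Dict Int (List (Int × Int)) × List Int) (node : Int) :
    PySem.Dict Int (List (Int × Int)) × List Int :=
  if PySem.Dict.contains st.1 node then st
  else (st.1.insert node ((PySem.Dict.mk graph).getD node []), st.2 ++ pvTargets graph node)

theorem pv_dcontains_insert {c : PySem.Dict Int (List (Int × Int))} {k : Int}
    (v : List (Int × Int)) (hk : PySem.Dict.contains c k = false) (u : Int) :
    PySem.Dict.contains (c.insert k v) u = (PySem.Dict.contains c u || (k == u)) := by
  simp only [PySem.Dict.insert, hk, Bool.false_eq_true, if_false]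
  simp [PySem.Dict.contains, List.any_append]

theorem pv_foldB (graph : List (Int × List (Int × Int))) :
    ∀ (fr : List Int) (c : PySem.Dict Int (List (Int × Int))) (nx : List Int),
    pvNu graph ((List.foldl (bfsStepB graph) (c, nx) fr).1) ≤ pvNu graph c ∧
    (pvNu graph ((List.foldl (bfsStepB graph) (c, nx) fr).1) = pvNu graph c →
      (List.foldl (bfsStepB graph) (c, nx) fr).2 = nx) := by
  intro fr
  induction fr with
  | nil => intro c nx; exact ⟨le_refl _, fun _ => rfl⟩
  | cons node fr ih =>
    intro c nx
    simp only [List.foldl_cons]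
    cases hc : PySem.Dict.contains c node with
    | true =>
      rw [show bfsStepB graph (c, nx) node = (c, nx) by simp [bfsStepB, hc]]
      exact ih c nx
    | false =>
      rw [show bfsStepB graph (c, nx) node
          = (c.insert node ((PySem.Dict.mk graph).getD node []), nx ++ pvTargets graph node) by
        simp [bfsStepB, hc]]
      by_cases hu : node ∈ pvUniv graph
      · have hlt : pvNu graph (c.insert node ((PySem.Dict.mk graph).getD node []))
            < pvNu graph c := by
          apply pv_filter_lt (x := node) ?_ hu (by simp [hc])
            (by simp [pv_dcontains_insert _ hc node])
          intro u hu2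
          rw [pv_dcontains_insert _ hc u] at hu2
          simp only [Bool.not_eq_eq_eq_not, Bool.not_true, Bool.or_eq_false_iff] at hu2
          simp [hu2.1]
        obtain ⟨ha, _⟩ := ih (c.insert node ((PySem.Dict.mk graph).getD node []))
          (nx ++ pvTargets graph node)
        refine ⟨le_trans ha (Nat.le_of_lt hlt), fun heq => absurd heq ?_⟩
        omega
      · have ht : pvTargets graph node = [] := pv_targets_nil hu
        have hcong : pvNu graph (c.insert node ((PySem.Dict.mk graph).getD node []))
            = pvNu graph c := by
          unfold pvNu
          congr 1
          apply List.filter_congr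
          intro u hmem
          have hne : (node == u) = false := by
            have : node ≠ u := fun hh => hu (hh ▸ hmem)
            simp [this]
          rw [pv_dcontains_insert _ hc u, hne, Bool.or_false]
        obtain ⟨ha, hb⟩ := ih (c.insert node ((PySem.Dict.mk graph).getD node [])) (nx ++ pvTargets graph node)
        rw [hcong] at ha hb
        rw [ht, List.append_nil] at ha hb ⊢
        exact ⟨ha, hb⟩

-- B's outer 'while frontier' loop
def bfsLoopB (graph : List (Int × List (Int × Int))) (c : PySem.Dict Int (List (Int × Int)))
    (frontier : List Int) : PySem.Dict Int (List (Int × Int)) :=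
  if h : frontier = [] then c
  else
    let st := List.foldl (bfsStepB graph) (c, []) frontier
    bfsLoopB graph st.1 st.2
  termination_by (pvNu graph c, frontier.length)
  decreasing_by
    simp only [List.foldl_attach]
    obtain ⟨h1, h2⟩ := pv_foldB graph frontier c []
    rcases lt_or_eq_of_le h1 with hlt | heq
    · exact Prod.Lex.left _ _ hlt
    · rw [heq, h2 heq]
      exact Prod.Lex.right _ (by simpa using List.length_pos_of_ne_nil h)

def bfsConnectivityCheck_alt (s : Int) (graph : List (Int × List (Int × Int))) :
    List (Int × List (Int × Int)) :=
  (bfsLoopB graph PySem.Dict.empty (pvTargets graph s)).items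

-- ===== PRECONDITION & SPEC =====
-- Pre_ excludes exactly the inputs where Python A raises KeyError: A looks up s and every node
-- its search reaches, so A returns normally iff the edge-closure of {s} (the least superset of
-- {s} closed under following edge targets; non-key nodes contribute no edges) stays inside the
-- key set.  The closure is stated as a bounded fixpoint iteration of the one-step edge map —
-- a property of the input graph, independent of either port's loop structure.
def pvClosure (s : Int) (graph : List (Int × List (Int × Int))) : PySem.Set Int :=
  (fun R => PySem.Set.update R (R.flatMap (pvTargets graph)))^[(pvT graph).succ]
    (PySem.Set.ofList [s])

def Pre_bfsConnectivityCheck (s : Int) (graph : List (Int × List (Int × Int))) : Prop :=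
  ∀ n ∈ pvClosure s graph, n ∈ graph.map Prod.fst

instance (s : Int) (graph : List (Int × List (Int × Int))) :
    Decidable (Pre_bfsConnectivityCheck s graph) := by
  unfold Pre_bfsConnectivityCheck; infer_instance

def pvWitness_bfsConnectivityCheck : Int × (List (Int × List (Int × Int))) :=
  (0, [(0, [(1, 3)]), (1, [])])

def Spec_bfsConnectivityCheck (s : Int) (graph : List (Int × List (Int × Int)))
    (out : List (Int × List (Int × Int))) : Prop :=
  out = bfsConnectivityCheck_alt s graph

instance (s : Int) (graph : List (Int × List (Int × Int)))
    (out : List (Int × List (Int × Int))) : Decidable (Spec_bfsConnectivityCheck s graph out) := by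
  unfold Spec_bfsConnectivityCheck; infer_instance

-- ===== CLAIM (what is proved, stated in full; the proofs are below) =====
def Claim_equal_bfsConnectivityCheck : Prop := ∀ (s : Int) (graph : List (Int × List (Int × Int))), Dom_bfsConnectivityCheck s graph → Pre_bfsConnectivityCheck s graph → Spec_bfsConnectivityCheck s graph (bfsConnectivityCheck s graph)

-- ===== LEMMAS AND PROOFS =====

theorem pv_loopA_nil (graph : List (Int × List (Int × Int))) (seen : PySem.Set Int) :
    bfsLoopA graph seen [] = seen := by
  rw [bfsLoopA]

theorem pv_loopA_skip (graph : List (Int × List (Int × Int))) (seen : PySem.Set Int) (x : Int)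
    (q : List Int) (hc : PySem.Set.contains seen x = true) :
    bfsLoopA graph seen (x :: q) = bfsLoopA graph seen q := by
  rw [bfsLoopA.eq_def]
  exact dif_pos hc

theorem pv_loopA_new (graph : List (Int × List (Int × Int))) (seen : PySem.Set Int) (x : Int)
    (q : List Int) (hc : PySem.Set.contains seen x = false) :
    bfsLoopA graph seen (x :: q)
      = bfsLoopA graph (PySem.Set.add seen x)
          (q ++ (pvTargets graph x).filter
            (fun v => !(PySem.Set.contains (PySem.Set.add seen x) v))) := by
  rw [bfsLoopA.eq_def]
  exact dif_neg (by rw [hc]; exact Bool.false_ne_true)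

theorem pv_loopB_nil (graph : List (Int × List (Int × Int)))
    (c : PySem.Dict Int (List (Int × Int))) : bfsLoopB graph c [] = c := by
  rw [bfsLoopB.eq_def]
  exact dif_pos rfl

theorem pv_loopB_cons (graph : List (Int × List (Int × Int)))
    (c : PySem.Dict Int (List (Int × Int))) (fr : List Int) (h : fr ≠ []) :
    bfsLoopB graph c fr
      = bfsLoopB graph (List.foldl (bfsStepB graph) (c, []) fr).1
          (List.foldl (bfsStepB graph) (c, []) fr).2 := by
  rw [bfsLoopB.eq_def]
  rw [dif_neg h]

theorem pv_mu_tail (graph : List (Int × List (Int × Int))) (seen : PySem.Set Int) (x : Int)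
    (q : List Int) : pvMu graph seen q + 1 = pvMu graph seen (x :: q) := by
  simp [pvMu]
  omega

theorem pv_L1 (graph : List (Int × List (Int × Int))) :
    ∀ (k : Nat) (p : Int → Bool) (seen : PySem.Set Int) (q1 q2 q3 : List Int),
    pvMu graph seen (q1 ++ q2 ++ q3) ≤ k →
    (∀ y, p y = false → PySem.Set.contains seen y = true) →
    bfsLoopA graph seen (q1 ++ q2.filter p ++ q3) = bfsLoopA graph seen (q1 ++ q2 ++ q3) := by
  intro k
  induction k with
  | zero =>
    intro p seen q1 q2 q3 hk hp
    have h0 : q1 = [] ∧ q2 = [] ∧ q3 = [] := by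
      unfold pvMu at hk
      simp only [List.length_append] at hk
      constructor
      · exact List.eq_nil_of_length_eq_zero (by omega)
      constructor
      · exact List.eq_nil_of_length_eq_zero (by omega)
      · exact List.eq_nil_of_length_eq_zero (by omega)
    simp [h0.1, h0.2.1, h0.2.2]
  | succ k ih =>
    intro p seen q1 q2 q3 hk hp
    cases q1 with
    | cons x q1' =>
      simp only [List.cons_append] at hk ⊢
      cases hc : PySem.Set.contains seen x with
      | true =>
        rw [pv_loopA_skip graph seen x _ hc, pv_loopA_skip graph seen x _ hc]
        exact ih p seen q1' q2 q3 (by rw [← pv_mu_tail graph seen x] at hk; omega) hp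
      | false =>
        rw [pv_loopA_new graph seen x _ hc, pv_loopA_new graph seen x _ hc]
        have hp' : ∀ y, p y = false → PySem.Set.contains (PySem.Set.add seen x) y = true :=
          fun y hy => pv_scontains_add_mono x (hp y hy)
        have hmu := pv_mu_step graph seen x (q1' ++ q2 ++ q3)
          ((pvTargets graph x).filter
            (fun v => !(PySem.Set.contains (PySem.Set.add seen x) v)))
          hc (List.length_filter_le _ _)
        rw [List.append_assoc (q1' ++ q2.filter p) q3, List.append_assoc (q1' ++ q2) q3,
          List.append_assoc q1' (q2.filter p), List.append_assoc q1' q2]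
        rw [← List.append_assoc q1' (q2.filter p), ← List.append_assoc q1' q2]
        apply ih p (PySem.Set.add seen x) q1' q2 _ ?_ hp'
        rw [← List.append_assoc (q1' ++ q2) q3]
        omega
    | nil =>
      cases q2 with
      | nil => simp
      | cons y q2' =>
        simp only [List.cons_append, List.nil_append] at hk ⊢
        by_cases hpy : p y = true
        · simp only [List.filter_cons, hpy, if_true, List.cons_append]
          cases hc : PySem.Set.contains seen y with
          | true =>
            rw [pv_loopA_skip graph seen y _ hc, pv_loopA_skip graph seen y _ hc]
            exact ih p seen [] q2' q3
              (by simp only [List.nil_append] at *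
                  rw [← pv_mu_tail graph seen y] at hk; omega) hp
          | false =>
            rw [pv_loopA_new graph seen y _ hc, pv_loopA_new graph seen y _ hc]
            have hp' : ∀ z, p z = false → PySem.Set.contains (PySem.Set.add seen y) z = true :=
              fun z hz => pv_scontains_add_mono y (hp z hz)
            have hmu := pv_mu_step graph seen y (q2' ++ q3)
              ((pvTargets graph y).filter
                (fun v => !(PySem.Set.contains (PySem.Set.add seen y) v)))
              hc (List.length_filter_le _ _)
            rw [List.append_assoc (q2'.filter p) q3, List.append_assoc q2' q3]
            have := ih p (PySem.Set.add seen y) [] q2'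
              (q3 ++ (pvTargets graph y).filter
                (fun v => !(PySem.Set.contains (PySem.Set.add seen y) v)))
              (by simp only [List.nil_append, List.append_assoc] at hmu hk ⊢
                  omega) hp'
            simpa using this
        · have hpyf : p y = false := by simpa using hpy
          have hcy : PySem.Set.contains seen y = true := hp y hpyf
          simp only [List.filter_cons, hpyf, Bool.false_eq_true, if_false]
          rw [pv_loopA_skip graph seen y _ hcy]
          exact ih p seen [] q2' q3
            (by simp only [List.nil_append] at *
                rw [← pv_mu_tail graph seen y] at hk; omega) hp

theorem pv_dictOf_contains (graph : List (Int × List (Int × Int))) (seen : List Int) (x : Int) :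
    PySem.Dict.contains (pvDictOf graph seen) x = PySem.Set.contains seen x := by
  rw [PySem.Dict.contains_eq_decide_mem_keys]
  have hk : (pvDictOf graph seen).keys = PySem.Set.ofList seen := by
    rw [pvDictOf, PySem.Dict.keys_foldl_insert]
    rfl
  rw [hk]
  cases hc : PySem.Set.contains seen x with
  | true =>
    simp only [decide_eq_true_eq, PySem.Set.mem_ofList]
    exact (pv_scontains_iff _ _).mp hc
  | false =>
    simp only [decide_eq_false_iff_not, PySem.Set.mem_ofList]
    intro hm
    rw [(pv_scontains_iff _ _).mpr hm] at hc
    cases hc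

theorem pv_dictOf_snoc (graph : List (Int × List (Int × Int))) {seen : PySem.Set Int} {x : Int}
    (h : PySem.Set.contains seen x = false) :
    pvDictOf graph (PySem.Set.add seen x)
      = (pvDictOf graph seen).insert x ((PySem.Dict.mk graph).getD x []) := by
  have hadd : PySem.Set.add seen x = seen ++ [x] := by
    simp only [PySem.Set.add, h, Bool.false_eq_true, if_false]
  rw [pvDictOf, hadd, List.foldl_append]
  rfl

theorem pv_C (graph : List (Int × List (Int × Int))) :
    ∀ (k : Nat) (fr nx : List Int) (seen : PySem.Set Int)
      (c : PySem.Dict Int (List (Int × Int))),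
    2 * pvMu graph seen (fr ++ nx) + (if fr = [] then 1 else 0) ≤ k →
    c = pvDictOf graph seen →
    pvDictOf graph (bfsLoopA graph seen (fr ++ nx))
      = bfsLoopB graph (List.foldl (bfsStepB graph) (c, nx) fr).1
          (List.foldl (bfsStepB graph) (c, nx) fr).2 := by
  intro k
  induction k with
  | zero =>
    intro fr nx seen c hk hc
    exfalso
    cases fr with
    | nil => simp at hk
    | cons x fr' =>
      unfold pvMu at hk
      simp at hk
  | succ k ih =>
    intro fr nx seen c hk hc
    cases fr with
    | nil =>
      simp only [List.foldl_nil, List.nil_append]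
      cases hnx : nx with
      | nil =>
        subst hnx
        rw [pv_loopA_nil, pv_loopB_nil]
        exact hc.symm
      | cons z nz =>
        subst hnx
        rw [pv_loopB_cons graph c (z :: nz) (by simp)]
        have hb : 2 * pvMu graph seen ((z :: nz) ++ []) + (if (z :: nz) = [] then 1 else 0) ≤ k := by
          have h1 : (if ((z :: nz) : List Int) = [] then (1:Nat) else 0) = 0 := by simp
          have h2 : (if ([] : List Int) = [] then (1:Nat) else 0) = 1 := by simp
          rw [h2] at hk
          rw [List.append_nil, h1]
          simp only [List.nil_append] at hk
          omega
        have := ih (z :: nz) [] seen c hb hc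
        simpa using this
    | cons x fr' =>
      simp only [List.foldl_cons, List.cons_append] at hk ⊢
      cases hcx : PySem.Set.contains seen x with
      | true =>
        have hdc : PySem.Dict.contains c x = true := by
          rw [hc, pv_dictOf_contains]; exact hcx
        rw [show bfsStepB graph (c, nx) x = (c, nx) by simp [bfsStepB, hdc]]
        rw [pv_loopA_skip graph seen x _ hcx]
        apply ih fr' nx seen c ?_ hc
        rw [← pv_mu_tail graph seen x] at hk
        have hfl : (if fr' = [] then 1 else 0) ≤ 1 := by split <;> omega
        simp only [if_neg (by simp : ¬(x :: fr') = [])] at hk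
        omega
      | false =>
        have hdc : PySem.Dict.contains c x = false := by
          rw [hc, pv_dictOf_contains]; exact hcx
        rw [show bfsStepB graph (c, nx) x
            = (c.insert x ((PySem.Dict.mk graph).getD x []), nx ++ pvTargets graph x) by
          simp [bfsStepB, hdc]]
        rw [pv_loopA_new graph seen x _ hcx]
        have hL1 := pv_L1 graph
          (pvMu graph (PySem.Set.add seen x) ((fr' ++ nx) ++ pvTargets graph x))
          (fun v => !(PySem.Set.contains (PySem.Set.add seen x) v))
          (PySem.Set.add seen x) (fr' ++ nx) (pvTargets graph x) []
          (by simp)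
          (by intro y hy
              simp only [] at hy
              cases h2 : PySem.Set.contains (PySem.Set.add seen x) y with
              | true => rfl
              | false => rw [h2] at hy; simp at hy)
        simp only [List.append_nil] at hL1
        rw [hL1]
        have hc' : c.insert x ((PySem.Dict.mk graph).getD x [])
            = pvDictOf graph (PySem.Set.add seen x) := by
          rw [pv_dictOf_snoc graph hcx, hc]
        have hmu := pv_mu_step graph seen x (fr' ++ nx) (pvTargets graph x) hcx (le_refl _)
        have hb : 2 * pvMu graph (PySem.Set.add seen x) (fr' ++ (nx ++ pvTargets graph x))
            + (if fr' = [] then 1 else 0) ≤ k := by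
          have hfl : (if fr' = [] then 1 else 0) ≤ 1 := by split <;> omega
          simp only [if_neg (by simp : ¬(x :: fr') = [])] at hk
          simp only [List.append_assoc] at hmu ⊢
          omega
        have := ih fr' (nx ++ pvTargets graph x) (PySem.Set.add seen x)
          (c.insert x ((PySem.Dict.mk graph).getD x [])) hb hc'
        rw [List.append_assoc]
        exact this

-- ===== VERDICT (by name: the statement is the Claim_ definition above) =====
theorem bfsConnectivityCheck_spec : Claim_equal_bfsConnectivityCheck := by
  unfold Claim_equal_bfsConnectivityCheck
  intro s graph _ _
  unfold Spec_bfsConnectivityCheck bfsConnectivityCheck bfsConnectivityCheck_alt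
  have h := pv_C graph (2 * pvMu graph [] ([] ++ pvTargets graph s) + 1)
    [] (pvTargets graph s) [] PySem.Dict.empty (le_refl _) rfl
  exact congrArg PySem.Dict.items (by simpa using h)
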